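-- pv_equiv track=rewrite | github.com/jiajunma/unipotentrepn | tests/test_compare_ls.py | dparts_for_type
-- ===== SOURCE A (Python) =====
-- def dparts_for_type(rtype, max_size):
--     """Generate all valid dual partitions for the given type up to max_size.
--
--     Dual partition parity rules:
--       C: all parts odd, total ODD  (Sp(2n), orbit size = 2n+1)
--       D: all parts odd, total EVEN (SO(2n), orbit size = 2n)
--       B: all parts even, total even (SO(2n+1))
--       M: all parts even, total even (Mp(2n))
--     """
--     if rtype == 'C':
--         # All parts odd, total odd
--         for n in range(1, max_size + 1, 2):
--             for p in _odd_partitions(n):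
--                 yield p
--     elif rtype == 'D':
--         # All parts odd, total even
--         for n in range(2, max_size + 1, 2):
--             for p in _odd_partitions(n):
--                 yield p
--     elif rtype in ('B', 'M'):
--         # All parts even, total even
--         for n in range(2, max_size + 1, 2):
--             for p in _even_partitions(n):
--                 yield p
--
-- def _odd_partitions(n, max_part=None):
--     """Generate all partitions of n with all parts odd."""
--     if n == 0:
--         yield ()
--         return
--     if max_part is None:
--         max_part = n if n % 2 == 1 else n - 1
--     for p in range(max_part, 0, -2):
--         if p > n:
--             continue
--         for rest in _odd_partitions(n - p, p):
--             yield (p,) + rest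
--
-- def _even_partitions(n, max_part=None):
--     """Generate all partitions of n with all parts even."""
--     if n == 0:
--         yield ()
--         return
--     if max_part is None:
--         max_part = n
--     for p in range(max_part, 0, -2):
--         if p > n:
--             continue
--         for rest in _even_partitions(n - p, p):
--             yield (p,) + rest
-- ===== SOURCE B (Python) =====
-- def dparts_for_type(rtype, max_size):
--     """Generate all valid dual partitions for the given type up to max_size.
--
--     Same sequence as the recursive enumerator, but computed by a single
--     parity-parameterized helper with a memo dict shared across all n, so no
--     subproblem (remaining, max_part) is ever enumerated twice."""
--     if rtype == 'C':
--         ns, odd = range(1, max_size + 1, 2), True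
--     elif rtype == 'D':
--         ns, odd = range(2, max_size + 1, 2), True
--     elif rtype in ('B', 'M'):
--         ns, odd = range(2, max_size + 1, 2), False
--     else:
--         return
--     memo = {}
--     for n in ns:
--         mdef = n if (not odd or n % 2 == 1) else n - 1
--         for p in _parts(n, _cap(mdef, n, odd), odd, memo):
--             yield p
--
-- def _cap(m, r, odd):
--     """Largest admissible part: min(m, r) rounded down to the parity."""
--     top = min(m, r)
--     if top % 2 != (1 if odd else 0):
--         top -= 1
--     return top
--
-- def _parts(r, t, odd, memo):
--     """All partitions of r into parts of the given parity <= t, descending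
--     lexicographic order; t is always _cap-normalized, so (r, t) is a canonical
--     memo key."""
--     if r == 0:
--         return [()]
--     if t < 1:
--         return []
--     key = (r, t)
--     v = memo.get(key)
--     if v is None:
--         v = []
--         for p in range(t, 0, -2):
--             v.extend((p,) + q for q in _parts(r - p, _cap(p, r - p, odd), odd, memo))
--         memo[key] = v
--     return v
-- ===== Notes on version B (the rewrite author's own statement) =====
-- stated objective: faster
-- what changed: The two naive recursive helpers are replaced by one parity-parameterized enumerator with cap-normalized subproblem keys memoized in a dict that is shared across the whole outer loop over n, so each subproblem (remaining, max_part) is solved once instead of once per occurrence.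
import Mathlib
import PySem

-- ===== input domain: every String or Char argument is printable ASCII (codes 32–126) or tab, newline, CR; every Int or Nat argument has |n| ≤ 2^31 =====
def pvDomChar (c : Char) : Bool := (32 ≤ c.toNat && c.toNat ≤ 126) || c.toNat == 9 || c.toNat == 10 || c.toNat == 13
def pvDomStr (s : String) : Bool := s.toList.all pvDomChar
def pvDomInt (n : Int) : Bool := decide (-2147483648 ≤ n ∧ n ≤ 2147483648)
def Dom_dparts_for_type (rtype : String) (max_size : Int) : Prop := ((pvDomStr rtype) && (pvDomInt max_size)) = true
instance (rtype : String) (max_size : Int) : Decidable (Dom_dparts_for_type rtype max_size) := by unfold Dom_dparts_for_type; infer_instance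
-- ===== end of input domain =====

-- B replaces A's two naive recursive enumerators by one parity-parameterized
-- enumerator memoized in a dict shared across the whole loop over n, so no subproblem is enumerated twice.

-- ===== PORT A =====
-- _odd_partitions: the 'for p in range(max_part, 0, -2)' loop is oddLoopA (p counts down by 2).
mutual
def oddPartitionsA (n : Int) (max_part : Option Int) : List (List Int) :=
  if n = 0 then [[]]
  else
    oddLoopA n (match max_part with
      | none => if n % 2 = 1 then n else n - 1
      | some m => m)
termination_by (n.toNat, (match max_part with
      | none => if n % 2 = 1 then n else n - 1
      | some m => m).toNat + 1)

def oddLoopA (n p : Int) : List (List Int) :=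
  if _h1 : 0 < p then
    (if _h2 : p > n then [] else (oddPartitionsA (n - p) (some p)).map (fun rest => p :: rest))
      ++ oddLoopA n (p - 2)
  else []
termination_by (n.toNat, p.toNat)
end

-- _even_partitions, same shape with default max_part = n.
mutual
def evenPartitionsA (n : Int) (max_part : Option Int) : List (List Int) :=
  if n = 0 then [[]]
  else
    evenLoopA n (match max_part with
      | none => n
      | some m => m)
termination_by (n.toNat, (match max_part with | none => n | some m => m).toNat + 1)

def evenLoopA (n p : Int) : List (List Int) :=
  if _h1 : 0 < p then
    (if _h2 : p > n then [] else (evenPartitionsA (n - p) (some p)).map (fun rest => p :: rest))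
      ++ evenLoopA n (p - 2)
  else []
termination_by (n.toNat, p.toNat)
end

def dparts_for_type (rtype : String) (max_size : Int) : List (List Int) :=
  if rtype = "C" then
    (PySem.List.pyRange 1 (max_size + 1) 2).foldl (fun acc n => acc ++ oddPartitionsA n none) []
  else if rtype = "D" then
    (PySem.List.pyRange 2 (max_size + 1) 2).foldl (fun acc n => acc ++ oddPartitionsA n none) []
  else if rtype = "B" ∨ rtype = "M" then
    (PySem.List.pyRange 2 (max_size + 1) 2).foldl (fun acc n => acc ++ evenPartitionsA n none) []
  else []

-- ===== PORT B =====
-- _cap(m, r, odd): largest admissible part: min(m, r) rounded down to the parity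
def capB (m r : Int) (odd : Bool) : Int :=
  let top := min m r
  if top % 2 ≠ (if odd then 1 else 0) then top - 1 else top

abbrev MemoB := PySem.Dict (Int × Int) (List (List Int))

-- _parts: memoized enumerator (the in-place dict mutation becomes state threading);
-- partsLoopB is the 'for p in range(t, 0, -2): v.extend(...)' loop.
mutual
def partsB (r t : Int) (odd : Bool) (memo : MemoB) : List (List Int) × MemoB :=
  if r = 0 then ([[]], memo)
  else if t < 1 then ([], memo)
  else
    match memo.get? (r, t) with
    | some v => (v, memo)
    | none =>
      let res := partsLoopB r t odd [] memo
      (res.1, res.2.insert (r, t) res.1)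
termination_by (r.toNat, t.toNat + 1)

def partsLoopB (r p : Int) (odd : Bool) (acc : List (List Int)) (memo : MemoB) : List (List Int) × MemoB :=
  -- 'p ≤ r' holds on every reachable state (p starts at a _cap value ≤ r); conjoined only for termination
  if _h : 0 < p ∧ p ≤ r then
    let w := partsB (r - p) (capB p (r - p) odd) odd memo
    partsLoopB r (p - 2) odd (acc ++ w.1.map (fun q => p :: q)) w.2
  else (acc, memo)
termination_by (r.toNat, p.toNat)
end

def dparts_for_type_alt (rtype : String) (max_size : Int) : List (List Int) :=
  let go : Bool → Int → List (List Int) := fun odd start =>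
    ((PySem.List.pyRange start (max_size + 1) 2).foldl
      (fun s n =>
        let mdef := if odd = false ∨ n % 2 = 1 then n else n - 1
        let res := partsB n (capB mdef n odd) odd s.2
        (s.1 ++ res.1, res.2)) ([], PySem.Dict.empty)).1
  if rtype = "C" then go true 1
  else if rtype = "D" then go true 2
  else if rtype = "B" ∨ rtype = "M" then go false 2
  else []

-- ===== PRECONDITION & SPEC =====
def Spec_dparts_for_type (rtype : String) (max_size : Int) (out : List (List Int)) : Prop := out = dparts_for_type_alt rtype max_size
instance (rtype : String) (max_size : Int) (out : List (List Int)) : Decidable (Spec_dparts_for_type rtype max_size out) := by unfold Spec_dparts_for_type; infer_instance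

-- ===== CLAIM (what is proved, stated in full; the proofs are below) =====
def Claim_equal_dparts_for_type : Prop := ∀ (rtype : String) (max_size : Int), Dom_dparts_for_type rtype max_size → Spec_dparts_for_type rtype max_size (dparts_for_type rtype max_size)

-- ===== LEMMAS AND PROOFS =====

-- the parity of a part value: 1 for odd types, 0 for even types
def parOf (odd : Bool) : Int := if odd then 1 else 0

-- the value any partsB call returns (and any memo entry stores), expressed through A's loops
def SpecValB (r t : Int) (odd : Bool) : List (List Int) :=
  if r = 0 then [[]] else if t < 1 then [] else if odd then oddLoopA r t else evenLoopA r t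

def InvB (odd : Bool) (memo : MemoB) : Prop :=
  ∀ r t v, memo.get? (r, t) = some v → v = SpecValB r t odd

lemma cap_le (m r : Int) (odd : Bool) : capB m r odd ≤ r ∧ capB m r odd ≤ m := by
  unfold capB; dsimp only; split_ifs <;> omega

lemma cap_parity (m r : Int) (odd : Bool) : capB m r odd % 2 = parOf odd := by
  unfold capB parOf; dsimp only; split_ifs <;> omega

lemma cap_eq_self (p r : Int) (odd : Bool) (h1 : p ≤ r) (h2 : p % 2 = parOf odd) :
    capB p r odd = p := by
  unfold capB parOf at *; dsimp only; split_ifs at * <;> omega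

lemma cap_skip (p r : Int) (odd : Bool) (_h0 : 0 ≤ r) (hp : r < p) (h2 : p % 2 = parOf odd) :
    capB p r odd = capB (p - 2) r odd := by
  unfold capB parOf at *; dsimp only; split_ifs at * <;> omega

lemma cap_pos (p r : Int) (odd : Bool) (hp : 1 ≤ p) (hr : 1 ≤ r)
    (hppar : p % 2 = parOf odd) (hre : odd = false → r % 2 = 0) : 1 ≤ capB p r odd := by
  unfold capB parOf at *
  cases odd <;> simp_all <;> split_ifs at * <;> omega

lemma capElimOdd : ∀ (K : Nat) (r p : Int), p.toNat ≤ K → 0 ≤ r → p % 2 = 1 →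
    oddLoopA r (capB p r true) = oddLoopA r p := by
  intro K
  induction K with
  | zero =>
    intro r p hK h0 hp
    have hcap : capB p r true = p := by simp only [capB, if_true]; split_ifs <;> omega
    rw [hcap]
  | succ K ih =>
    intro r p hK h0 hp
    by_cases hple : p ≤ 0
    · have hcap : capB p r true = p := by simp only [capB, if_true]; split_ifs <;> omega
      rw [hcap]
    · by_cases hpr : p ≤ r
      · rw [cap_eq_self p r true hpr (by simpa [parOf] using hp)]
      · have hskip : capB p r true = capB (p - 2) r true :=
          cap_skip p r true h0 (by omega) (by simpa [parOf] using hp)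
        have hih := ih r (p - 2) (by omega) h0 (by omega)
        rw [hskip, hih]
        conv_rhs => rw [oddLoopA.eq_def]
        simp [show (0:Int) < p by omega, show p > r by omega]

lemma capElimEven : ∀ (K : Nat) (r p : Int), p.toNat ≤ K → 0 ≤ r → p % 2 = 0 →
    evenLoopA r (capB p r false) = evenLoopA r p := by
  intro K
  induction K with
  | zero =>
    intro r p hK h0 hp
    have hcap : capB p r false = p := by simp only [capB, Bool.false_eq_true, if_false]; split_ifs <;> omega
    rw [hcap]
  | succ K ih =>
    intro r p hK h0 hp
    by_cases hple : p ≤ 0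
    · have hcap : capB p r false = p := by simp only [capB, Bool.false_eq_true, if_false]; split_ifs <;> omega
      rw [hcap]
    · by_cases hpr : p ≤ r
      · rw [cap_eq_self p r false hpr (by simpa [parOf] using hp)]
      · have hskip : capB p r false = capB (p - 2) r false :=
          cap_skip p r false h0 (by omega) (by simpa [parOf] using hp)
        have hih := ih r (p - 2) (by omega) h0 (by omega)
        rw [hskip, hih]
        conv_rhs => rw [evenLoopA.eq_def]
        simp [show (0:Int) < p by omega, show p > r by omega]

lemma SpecValB_cap (odd : Bool) (r' p : Int) (h0 : 0 ≤ r') (hp : 1 ≤ p)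
    (hppar : p % 2 = parOf odd) (hre : odd = false → r' % 2 = 0) :
    SpecValB r' (capB p r' odd) odd
      = (if odd then oddPartitionsA r' (some p) else evenPartitionsA r' (some p)) := by
  rcases eq_or_ne r' 0 with h | h
  · subst h
    cases odd
    · simp only [SpecValB, Bool.false_eq_true, if_false]
      rw [evenPartitionsA.eq_def]; simp
    · simp only [SpecValB, if_true]
      rw [oddPartitionsA.eq_def]; simp
  · have h1 : (1:Int) ≤ r' := by omega
    have hcp := cap_pos p r' odd (by omega) h1 hppar hre
    cases odd
    · simp only [SpecValB, if_neg h, if_neg (by omega : ¬ capB p r' false < 1),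
        Bool.false_eq_true, if_false]
      rw [evenPartitionsA.eq_def]
      simp only [if_neg h]
      exact capElimEven p.toNat r' p le_rfl (by omega) (by simpa [parOf] using hppar)
    · simp only [SpecValB, if_neg h, if_neg (by omega : ¬ capB p r' true < 1), if_true]
      rw [oddPartitionsA.eq_def]
      simp only [if_neg h]
      exact capElimOdd p.toNat r' p le_rfl (by omega) (by simpa [parOf] using hppar)

lemma InvB_insert (odd : Bool) (memo : MemoB) (r t : Int) (v : List (List Int))
    (h : InvB odd memo) (hv : v = SpecValB r t odd) : InvB odd (memo.insert (r, t) v) := by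
  intro r' t' v' h'
  rw [PySem.Dict.get?_insert] at h'
  split at h'
  · rename_i heq
    cases Prod.mk.injEq .. ▸ heq with
    | intro h1 h2 => subst h1; subst h2; cases h'; exact hv
  · exact h _ _ _ h'

lemma partsLoopB_spec (odd : Bool) (r : Int) (hr : 1 ≤ r) (hre : odd = false → r % 2 = 0)
    (IH : ∀ (r' t' : Int) (memo' : MemoB), 0 ≤ r' → r'.toNat < r.toNat →
      (odd = false → r' % 2 = 0) → t' ≤ r' → t' % 2 = parOf odd → InvB odd memo' →
      (partsB r' t' odd memo').1 = SpecValB r' t' odd ∧ InvB odd (partsB r' t' odd memo').2) :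
    ∀ (K : Nat) (p : Int) (acc : List (List Int)) (memo : MemoB), p.toNat ≤ K → p ≤ r →
      p % 2 = parOf odd → InvB odd memo →
      (partsLoopB r p odd acc memo).1
          = acc ++ (if odd then oddLoopA r p else evenLoopA r p)
        ∧ InvB odd (partsLoopB r p odd acc memo).2 := by
  intro K
  induction K with
  | zero =>
    intro p acc memo hK hpr hpar hInv
    rw [partsLoopB.eq_def, dif_neg (by omega : ¬ (0 < p ∧ p ≤ r))]
    have hnil : (if odd then oddLoopA r p else evenLoopA r p) = [] := by
      cases odd
      · rw [evenLoopA.eq_def, dif_neg (by omega : ¬ (0:Int) < p)]; simp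
      · rw [oddLoopA.eq_def, dif_neg (by omega : ¬ (0:Int) < p)]; simp
    exact ⟨by simp [hnil], hInv⟩
  | succ K ih =>
    intro p acc memo hK hpr hpar hInv
    by_cases hp0 : 0 < p
    · rw [partsLoopB.eq_def, dif_pos ⟨hp0, hpr⟩]
      have hcap_le := (cap_le p (r - p) odd).1
      have hcappar := cap_parity p (r - p) odd
      have hrp_par : odd = false → (r - p) % 2 = 0 := by
        intro hof; have h1 := hre hof; have h2 := hpar
        rw [hof] at h2; simp only [parOf, Bool.false_eq_true, if_false] at h2; omega
      obtain ⟨hw1, hw2⟩ := IH (r - p) (capB p (r - p) odd) memo (by omega) (by omega)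
        hrp_par hcap_le hcappar hInv
      have hpar2 : (p - 2) % 2 = parOf odd := by
        have := hpar; unfold parOf at *; split_ifs at * <;> omega
      obtain ⟨hrec1, hrec2⟩ := ih (p - 2)
        (acc ++ (partsB (r - p) (capB p (r - p) odd) odd memo).1.map (fun q => p :: q))
        (partsB (r - p) (capB p (r - p) odd) odd memo).2 (by omega) (by omega) hpar2 hw2
      refine ⟨?_, ?_⟩
      · dsimp only
        rw [hrec1, hw1, SpecValB_cap odd (r - p) p (by omega) (by omega) hpar hrp_par]
        cases odd
        · conv_rhs => rw [evenLoopA.eq_def]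
          rw [dif_pos hp0, dif_neg (by omega : ¬ p > r)]
          simp
        · conv_rhs => rw [oddLoopA.eq_def]
          rw [dif_pos hp0, dif_neg (by omega : ¬ p > r)]
          simp
      · dsimp only
        exact hrec2
    · rw [partsLoopB.eq_def, dif_neg (by omega : ¬ (0 < p ∧ p ≤ r))]
      have hnil : (if odd then oddLoopA r p else evenLoopA r p) = [] := by
        cases odd
        · rw [evenLoopA.eq_def, dif_neg (by omega : ¬ (0:Int) < p)]; simp
        · rw [oddLoopA.eq_def, dif_neg (by omega : ¬ (0:Int) < p)]; simp
      exact ⟨by simp [hnil], hInv⟩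

lemma partsB_spec (odd : Bool) : ∀ (N : Nat) (r t : Int) (memo : MemoB),
    r.toNat ≤ N → 0 ≤ r → (odd = false → r % 2 = 0) → t ≤ r → t % 2 = parOf odd →
    InvB odd memo →
    (partsB r t odd memo).1 = SpecValB r t odd ∧ InvB odd (partsB r t odd memo).2 := by
  intro N
  induction N with
  | zero =>
    intro r t memo hN h0 hre ht hpar hInv
    have hr0 : r = 0 := by omega
    subst hr0
    rw [partsB.eq_def]
    simp only [reduceIte]
    exact ⟨by simp [SpecValB], hInv⟩
  | succ N ih =>
    intro r t memo hN h0 hre ht hpar hInv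
    by_cases hr0 : r = 0
    · subst hr0
      rw [partsB.eq_def]
      simp only [reduceIte]
      exact ⟨by simp [SpecValB], hInv⟩
    · by_cases ht1 : t < 1
      · rw [partsB.eq_def]
        simp only [if_neg hr0, if_pos ht1]
        exact ⟨by simp [SpecValB, if_neg hr0, if_pos ht1], hInv⟩
      · cases hget : memo.get? (r, t) with
        | some v =>
          rw [partsB.eq_def]
          simp only [if_neg hr0, if_neg ht1, hget]
          have hv := hInv r t v hget
          exact ⟨hv, hInv⟩
        | none =>
          rw [partsB.eq_def]
          simp only [if_neg hr0, if_neg ht1, hget]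
          have hr1 : (1:Int) ≤ r := by omega
          obtain ⟨hL1, hL2⟩ := partsLoopB_spec odd r hr1 hre
            (fun r' t' memo' a b c d e f => ih r' t' memo' (by omega) a c d e f)
            t.toNat t [] memo le_rfl ht hpar hInv
          have hval : (partsLoopB r t odd [] memo).1 = SpecValB r t odd := by
            rw [hL1]; simp [SpecValB, if_neg hr0, if_neg ht1]
          refine ⟨?_, ?_⟩
          · dsimp only
            exact hval
          · dsimp only
            exact InvB_insert odd _ r t _ hL2 hval

lemma chunk_spec (odd : Bool) (n : Int) (memo : MemoB) (h1 : 1 ≤ n)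
    (h2 : odd = false → n % 2 = 0) (hInv : InvB odd memo) :
    (partsB n (capB (if odd = false ∨ n % 2 = 1 then n else n - 1) n odd) odd memo).1
        = (if odd then oddPartitionsA n none else evenPartitionsA n none)
      ∧ InvB odd (partsB n (capB (if odd = false ∨ n % 2 = 1 then n else n - 1) n odd) odd memo).2 := by
  have hcap_le := (cap_le (if odd = false ∨ n % 2 = 1 then n else n - 1) n odd).1
  have hcappar := cap_parity (if odd = false ∨ n % 2 = 1 then n else n - 1) n odd
  obtain ⟨hs, hi⟩ := partsB_spec odd n.toNat n
    (capB (if odd = false ∨ n % 2 = 1 then n else n - 1) n odd) memo le_rfl (by omega) h2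
    hcap_le hcappar hInv
  refine ⟨?_, hi⟩
  rw [hs]
  cases odd
  · -- even types: mdef = n, cap = n
    have hne : n % 2 = 0 := h2 rfl
    have hmdef : (if (false : Bool) = false ∨ n % 2 = 1 then n else n - 1) = n := by
      simp
    rw [hmdef, cap_eq_self n n false le_rfl (by simpa [parOf] using hne)]
    simp only [SpecValB, if_neg (by omega : ¬ n = 0), if_neg (by omega : ¬ n < 1),
      Bool.false_eq_true, if_false]
    rw [evenPartitionsA.eq_def]
    simp only [if_neg (by omega : ¬ n = 0)]
  · -- odd types
    rcases Int.emod_two_eq_zero_or_one n with hne | hno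
    · -- n even: mdef = n - 1
      have hmdef : (if (true : Bool) = false ∨ n % 2 = 1 then n else n - 1) = n - 1 := by
        simp [hne]
      have hn2 : (2:Int) ≤ n := by omega
      rw [hmdef, cap_eq_self (n - 1) n true (by omega) (by simp [parOf]; omega)]
      simp only [SpecValB, if_neg (by omega : ¬ n = 0), if_neg (by omega : ¬ n - 1 < 1), if_true]
      rw [oddPartitionsA.eq_def]
      simp only [if_neg (by omega : ¬ n = 0), hne]
      norm_num
    · -- n odd: mdef = n
      have hmdef : (if (true : Bool) = false ∨ n % 2 = 1 then n else n - 1) = n := by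
        simp [hno]
      rw [hmdef, cap_eq_self n n true le_rfl (by simpa [parOf] using hno)]
      simp only [SpecValB, if_neg (by omega : ¬ n = 0), if_neg (by omega : ¬ n < 1), if_true]
      rw [oddPartitionsA.eq_def]
      simp only [if_neg (by omega : ¬ n = 0), hno]
      norm_num

lemma fold_eq (odd : Bool) : ∀ (ns : List Int),
    (∀ n ∈ ns, 1 ≤ n ∧ (odd = false → n % 2 = 0)) →
    ∀ (out : List (List Int)) (memo : MemoB), InvB odd memo →
    (ns.foldl (fun s n =>
        let mdef := if odd = false ∨ n % 2 = 1 then n else n - 1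
        let res := partsB n (capB mdef n odd) odd s.2
        (s.1 ++ res.1, res.2)) (out, memo)).1
      = ns.foldl (fun acc n =>
          acc ++ (if odd then oddPartitionsA n none else evenPartitionsA n none)) out := by
  intro ns
  induction ns with
  | nil => intro _ out memo _; rfl
  | cons n ns ih =>
    intro h out memo hInv
    have hc := h n (by simp)
    have hrest : ∀ m ∈ ns, 1 ≤ m ∧ (odd = false → m % 2 = 0) := fun m hm => h m (by simp [hm])
    obtain ⟨he, hi⟩ := chunk_spec odd n memo hc.1 hc.2 hInv
    simp only [List.foldl_cons]
    rw [ih hrest _ _ hi, he]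

lemma InvB_empty (odd : Bool) : InvB odd PySem.Dict.empty := by
  intro r t v h
  simp [PySem.Dict.get?_empty] at h

-- ===== VERDICT (by name: the statement is the Claim_ definition above) =====
theorem dparts_for_type_spec : Claim_equal_dparts_for_type := by
  intro rtype max_size _
  unfold Spec_dparts_for_type dparts_for_type dparts_for_type_alt
  split_ifs with h1 h2 h3
  · exact (fold_eq true (PySem.List.pyRange 1 (max_size + 1) 2) (fun n hn => ⟨((PySem.List.mem_pyRange_iff_of_pos (by norm_num) n).1 hn).1,
      by simp⟩) [] _ (InvB_empty true)).symm
  · exact (fold_eq true (PySem.List.pyRange 2 (max_size + 1) 2) (fun n hn => ⟨by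
      have := ((PySem.List.mem_pyRange_iff_of_pos (by norm_num) n).1 hn).1; omega,
      by simp⟩) [] _ (InvB_empty true)).symm
  · exact (fold_eq false (PySem.List.pyRange 2 (max_size + 1) 2) (fun n hn => by
      have h := (PySem.List.mem_pyRange_iff_of_pos (by norm_num) n).1 hn
      obtain ⟨ha, _, hd⟩ := h
      exact ⟨by omega, fun _ => by omega⟩) [] _ (InvB_empty false)).symm
  · rfl
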